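-- pv_equiv track=rewrite | github.com/NathanDuran/Sentence-Encoding-for-DA-Classification | data_processor.py | join_punctuation
-- ===== SOURCE A (Python) =====
-- import string
--
-- def join_punctuation(tokens, characters='.,;?!'):
--     # characters = set(characters)
--
--     try:
--         tokens = iter(tokens)
--         current = next(tokens)
--
--         for char in tokens:
--             if char in string.punctuation:
--                 current += char
--             else:
--                 yield current
--                 current = char
--
--         yield current
--     except StopIteration:
--         return
-- ===== SOURCE B (Python) =====
-- import string
--
--
-- def join_punctuation(tokens, characters='.,;?!'):
--     # span-based: for each group, scan ahead over punctuation tokens and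
--     # join the slice in one step (no running string accumulator)
--     tokens = list(tokens)
--     n = len(tokens)
--     i = 0
--     while i < n:
--         j = i + 1
--         while j < n and tokens[j] in string.punctuation:
--             j += 1
--         yield ''.join(tokens[i:j])
--         i = j
-- ===== Notes on version B (the rewrite author's own statement) =====
-- stated objective: alternative
-- what changed: Replaces A's running string accumulator (current += char, yield on break) with a two-pointer span scan: for each group head, advance j over the following punctuation tokens and yield ''.join of the slice.
import Mathlib
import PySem

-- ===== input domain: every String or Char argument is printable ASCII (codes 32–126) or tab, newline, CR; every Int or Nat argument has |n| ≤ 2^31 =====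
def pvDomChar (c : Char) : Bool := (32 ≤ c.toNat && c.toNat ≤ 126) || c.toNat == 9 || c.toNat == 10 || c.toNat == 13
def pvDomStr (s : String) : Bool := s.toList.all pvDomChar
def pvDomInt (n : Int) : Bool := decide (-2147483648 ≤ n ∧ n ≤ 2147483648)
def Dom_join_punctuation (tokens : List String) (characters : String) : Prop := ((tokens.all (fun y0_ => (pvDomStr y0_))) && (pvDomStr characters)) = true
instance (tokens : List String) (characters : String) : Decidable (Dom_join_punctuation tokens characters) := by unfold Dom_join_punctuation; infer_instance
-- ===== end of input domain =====

-- B replaces A's running string accumulator with a two-pointer span scan that joins each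
-- slice in one step (objective: alternative structure, same cost; 'characters' is unused by both).

-- string.punctuation (shared constant; both Pythons test `tok in string.punctuation`)
def pyPunctuation : String := "!\"#$%&'()*+,-./:;<=>?@[\\]^_`{|}~"

-- Python's `tok in string.punctuation` (substring test), shared by both ports
def pvIsPunct (tok : String) : Bool := PySem.Str.isIn tok pyPunctuation

-- ===== PORT A =====
-- A's for-loop over the remaining iterator, with `current` the running accumulator
def join_punctuation_goA (current : String) : List String → List String
  | [] => [current]                                   -- the final `yield current`
  | ch :: ts =>
    if pvIsPunct ch then join_punctuation_goA (current ++ ch) ts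
    else current :: join_punctuation_goA ch ts

def join_punctuation (tokens : List String) (characters : String) : List String :=
  match tokens with
  | [] => []                                          -- next() raises StopIteration → return
  | c :: ts => join_punctuation_goA c ts

-- ===== PORT B =====
-- B's outer while loop: j scans over the following punctuation tokens (the inner while),
-- then ''.join(tokens[i:j]) is yielded and i jumps to j.
def join_punctuation_goB : List String → List String
  | [] => []
  | t :: rest =>
    PySem.Str.join "" (t :: rest.takeWhile pvIsPunct)
      :: join_punctuation_goB (rest.dropWhile pvIsPunct)
  termination_by ts => ts.length
  decreasing_by
    simpa using Nat.lt_succ_of_le (List.length_dropWhile_le pvIsPunct rest)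

def join_punctuation_alt (tokens : List String) (characters : String) : List String :=
  join_punctuation_goB tokens

-- ===== PRECONDITION & SPEC =====
def Spec_join_punctuation (tokens : List String) (characters : String) (out : List String) : Prop := out = join_punctuation_alt tokens characters
instance (tokens : List String) (characters : String) (out : List String) : Decidable (Spec_join_punctuation tokens characters out) := by unfold Spec_join_punctuation; infer_instance

-- ===== CLAIM (what is proved, stated in full; the proofs are below) =====
def Claim_equal_join_punctuation : Prop := ∀ (tokens : List String) (characters : String), Dom_join_punctuation tokens characters → Spec_join_punctuation tokens characters (join_punctuation tokens characters)

-- ===== LEMMAS AND PROOFS =====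

-- strings are equal iff their character lists are
theorem pv_str_ext {s t : String} (h : s.toList = t.toList) : s = t :=
  String.toList_inj.mp h

-- ''.join with empty separator concatenates
theorem pv_joinNil (l : List (List Char)) : PySem.Chars.join [] l = l.flatten := by
  unfold PySem.Chars.join
  induction l with
  | nil => simp [List.intercalate]
  | cons x xs ih =>
    cases xs with
    | nil => simp [List.intercalate]
    | cons y ys =>
      simp only [List.intercalate, List.intersperse] at ih ⊢
      simp_all

theorem pv_join_append (c t : String) (tw : List String) :
    PySem.Str.join "" ((c ++ t) :: tw) = PySem.Str.join "" (c :: t :: tw) := by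
  apply pv_str_ext
  simp [pv_joinNil]

theorem pv_join_single (c : String) : PySem.Str.join "" [c] = c := by
  apply pv_str_ext
  simp

-- A's accumulator loop computes the head group (c plus the punctuation span) followed by B on the rest
theorem pv_goA_eq (ts : List String) : ∀ c : String,
    join_punctuation_goA c ts =
      PySem.Str.join "" (c :: ts.takeWhile pvIsPunct)
        :: join_punctuation_goB (ts.dropWhile pvIsPunct) := by
  induction ts with
  | nil => intro c; simp [join_punctuation_goA, join_punctuation_goB, pv_join_single]
  | cons t ts ih =>
    intro c
    by_cases h : pvIsPunct t = true
    · simp [join_punctuation_goA, h, ih (c ++ t), pv_join_append]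
    · simp only [Bool.not_eq_true] at h
      rw [join_punctuation_goA]
      simp [h, ih t, join_punctuation_goB, pv_join_single]

-- ===== VERDICT (by name: the statement is the Claim_ definition above) =====
theorem join_punctuation_spec : Claim_equal_join_punctuation := by
  intro tokens characters _
  cases tokens with
  | nil =>
    simp [Spec_join_punctuation, join_punctuation, join_punctuation_alt, join_punctuation_goB]
  | cons c ts =>
    show join_punctuation_goA c ts = _
    rw [pv_goA_eq ts c]
    simp [join_punctuation_alt, join_punctuation_goB]
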